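-- pv_equiv track=rewrite | github.com/internet-sicherheit/pive | pive/visualizationmapper.py | is_data_value_ascending
-- ===== SOURCE A (Python) =====
-- def is_data_value_ascending(dataset):
--     """Checks if the data is ascending."""
--     ascending = True
--     starting_abscissa = list((dataset[0]).items())[0][1]
--     last_abscissa = starting_abscissa
--     for item in dataset[1:]:
--         current_abscisssa = list(item.items())[0]
--         if (current_abscisssa[1] <= last_abscissa):
--             ascending = False
--         last_abscissa = current_abscisssa[1]
--     return ascending
-- ===== SOURCE B (Python) =====
-- def is_data_value_ascending(dataset):
--     """Checks if the data is ascending."""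
--     vals = [list(d.items())[0][1] for d in dataset]
--     return vals == sorted(set(vals))
-- ===== Notes on version B (the rewrite author's own statement) =====
-- stated objective: alternative
-- what changed: Replaces A's single-pass scan with an ascending flag and last-abscissa accumulator by a sort-based check: project the leading abscissae and compare the list with sorted(set(vals)), which equals it exactly when it is strictly ascending.
import Mathlib
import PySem

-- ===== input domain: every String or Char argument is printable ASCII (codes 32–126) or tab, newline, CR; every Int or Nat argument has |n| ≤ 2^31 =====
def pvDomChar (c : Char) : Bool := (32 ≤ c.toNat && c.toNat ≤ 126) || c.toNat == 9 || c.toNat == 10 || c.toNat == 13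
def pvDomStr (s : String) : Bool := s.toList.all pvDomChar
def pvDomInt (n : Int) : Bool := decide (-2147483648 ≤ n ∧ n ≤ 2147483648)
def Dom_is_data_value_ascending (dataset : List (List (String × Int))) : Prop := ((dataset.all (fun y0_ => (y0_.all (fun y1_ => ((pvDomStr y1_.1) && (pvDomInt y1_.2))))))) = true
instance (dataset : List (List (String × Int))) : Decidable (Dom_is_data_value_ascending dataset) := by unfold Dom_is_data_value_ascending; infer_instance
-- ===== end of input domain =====

-- B replaces A's stateful flag-and-last-abscissa scan by a sort-based check:
-- the leading abscissae are strictly ascending iff they equal sorted(set(...)).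

-- first value of the dict `d` (list(d.items())[0][1]); the default is only reached
-- for an empty dict, where Python raises (excluded by Pre_)
def pvFirstVal (d : List (String × Int)) : Int :=
  (((PySem.Dict.ofList d).items).headD ("", 0)).2

-- ===== PORT A =====
def is_data_value_ascending (dataset : List (List (String × Int))) : Bool :=
  -- ascending = True; starting_abscissa = list(dataset[0].items())[0][1]; last = starting
  let starting_abscissa := pvFirstVal (dataset.headD [])
  -- for item in dataset[1:]: state (ascending, last_abscissa)
  (List.foldl
    (fun (st : Bool × Int) item =>
      let cur := pvFirstVal item
      (if cur ≤ st.2 then false else st.1, cur))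
    (true, starting_abscissa) (dataset.drop 1)).1

-- ===== PORT B =====
def is_data_value_ascending_alt (dataset : List (List (String × Int))) : Bool :=
  -- vals = [list(d.items())[0][1] for d in dataset]
  let vals := dataset.map pvFirstVal
  -- vals == sorted(set(vals))
  decide (vals = PySem.List.sorted (PySem.Set.ofList vals) (fun x => x))

-- ===== PRECONDITION & SPEC =====
-- Pre_ excludes exactly the inputs where A raises IndexError: an empty dataset, or a
-- dataset containing an empty dict (list(item.items())[0] out of range).
def Pre_is_data_value_ascending (dataset : List (List (String × Int))) : Prop :=
  dataset ≠ [] ∧ ∀ d ∈ dataset, d ≠ []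
instance (dataset : List (List (String × Int))) : Decidable (Pre_is_data_value_ascending dataset) := by
  unfold Pre_is_data_value_ascending; infer_instance

def pvWitness_is_data_value_ascending : (List (List (String × Int))) :=
  [[("a", 1)], [("b", 2)]]

def Spec_is_data_value_ascending (dataset : List (List (String × Int))) (out : Bool) : Prop :=
  out = is_data_value_ascending_alt dataset
instance (dataset : List (List (String × Int))) (out : Bool) : Decidable (Spec_is_data_value_ascending dataset out) := by
  unfold Spec_is_data_value_ascending; infer_instance

-- ===== CLAIM (what is proved, stated in full; the proofs are below) =====
def Claim_equal_is_data_value_ascending : Prop := ∀ (dataset : List (List (String × Int))), Dom_is_data_value_ascending dataset → Pre_is_data_value_ascending dataset → Spec_is_data_value_ascending dataset (is_data_value_ascending dataset)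

-- ===== LEMMAS AND PROOFS =====

-- A's flag-and-last fold equals the pairwise consecutive check chained from `last`.
lemma fold_eq_pairwise (ds : List (List (String × Int))) :
    ∀ (b : Bool) (last : Int),
      (List.foldl
        (fun (st : Bool × Int) item =>
          let cur := pvFirstVal item
          (if cur ≤ st.2 then false else st.1, cur))
        (b, last) ds).1
      = (b && (((last :: ds.map pvFirstVal).zip (ds.map pvFirstVal)).all
          (fun p => decide (p.1 < p.2)))) := by
  induction ds with
  | nil => simp
  | cons d ds ih =>
      intro b last
      simp only [List.foldl_cons, List.map_cons, List.zip_cons_cons, List.all_cons]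
      rw [ih]
      by_cases h : pvFirstVal d ≤ last
      · simp [h, not_lt.mpr h]
      · simp [h, lt_of_not_ge h]

-- the consecutive strict check on v :: m is exactly Pairwise (<)
lemma zipall_iff (m : List Int) : ∀ (v : Int),
    ((((v :: m).zip m).all (fun p => decide (p.1 < p.2))) = true)
      ↔ List.Pairwise (· < ·) (v :: m) := by
  induction m with
  | nil => intro v; simp
  | cons w m ih =>
      intro v
      rw [List.pairwise_cons]
      simp only [List.zip_cons_cons, List.all_cons, Bool.and_eq_true, decide_eq_true_iff]
      constructor
      · rintro ⟨hvw, hrest⟩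
        have hp := (ih w).mp hrest
        refine ⟨?_, hp⟩
        intro x hx
        rcases List.mem_cons.mp hx with rfl | hxm
        · exact hvw
        · exact lt_trans hvw (List.rel_of_pairwise_cons hp hxm)
      · rintro ⟨hall, hp⟩
        exact ⟨hall w (List.mem_cons_self ..), (ih w).mpr hp⟩

-- vals == sorted(set(vals)) iff vals is strictly increasing
lemma sorted_dedup_iff (vals : List Int) :
    vals = PySem.List.sorted (PySem.Set.ofList vals) (fun x => x)
      ↔ List.Pairwise (· < ·) vals := by
  constructor
  · intro h
    rw [h]
    exact PySem.List.sorted_ofList_pairwise_lt vals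
  · intro h
    have hnd : vals.Nodup := h.imp (fun hlt => ne_of_lt hlt)
    have hperm : vals.Perm (PySem.Set.ofList vals) := by
      rw [(List.perm_ext_iff_of_nodup hnd (PySem.Set.nodup_ofList vals))]
      intro a
      exact (PySem.Set.mem_ofList vals a).symm
    exact (PySem.List.sorted_eq_of_perm_of_pairwise_lt _ _ _ hperm h).symm

-- ===== VERDICT (by name: the statement is the Claim_ definition above) =====
theorem is_data_value_ascending_spec : Claim_equal_is_data_value_ascending := by
  intro dataset _ hpre
  unfold Spec_is_data_value_ascending
  cases dataset with
  | nil => exact absurd rfl hpre.1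
  | cons d ds =>
      unfold is_data_value_ascending is_data_value_ascending_alt
      simp only [List.headD_cons, List.drop_succ_cons, List.drop_zero, List.map_cons]
      rw [fold_eq_pairwise, Bool.true_and]
      have h := (zipall_iff (ds.map pvFirstVal) (pvFirstVal d)).trans
        (sorted_dedup_iff (pvFirstVal d :: ds.map pvFirstVal)).symm
      rw [← decide_eq_true_iff
        (p := pvFirstVal d :: ds.map pvFirstVal
          = PySem.List.sorted (PySem.Set.ofList (pvFirstVal d :: ds.map pvFirstVal)) (fun x => x))] at h
      exact Bool.coe_iff_coe.mp h
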